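-- pv_equiv track=rewrite | github.com/tobiaszehnder/genomic_projection | functions.py | get_kmer_id
-- ===== SOURCE A (Python) =====
-- def get_kmer_id(x):
--   # compute a unique ID for a given kmer as the sum of the products of the letter at position i (A=0, C=1, ...) times alphabet size to the power of the position number
--   # (e.g. 5^0 at the first position). include a character `x` to prevent k-mers with different k to have the same ID.
--   alph = dict(zip(list('ACGT#'), range(5)))
--   complement = {'A':'T', 'C':'G', 'G':'C', 'T':'A'}
--   rev = x[::-1]
--   comp = ''.join([complement[x_i] for x_i in x])
--   rev_comp = comp[::-1]
--   kmrs = [y + '#' for y in [x, rev, comp, rev_comp]]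
--   l = len(alph)
--   return min([sum([alph[kmr[i]] * l**i for i in range(len(kmr))]) for kmr in kmrs])
-- ===== SOURCE B (Python) =====
-- def get_kmer_id(x):
--     # one pass: forward/reverse base-5 encodings; complement IDs via 3*S - id
--     digit = {'A': 0, 'C': 1, 'G': 2, 'T': 3}
--     f = r = s = 0
--     p = 1
--     for c in x:
--         d = digit[c]
--         f += d * p
--         r = r * 5 + d
--         s += p
--         p *= 5
--     return min(min(f, r), min(3 * s - f, 3 * s - r)) + 4 * p
-- ===== Notes on version B (the rewrite author's own statement) =====
-- stated objective: alternative
-- what changed: B replaces A's construction of four strand strings and four per-position power sums by a single forward pass that accumulates the forward and reverse base-5 encodings plus the running power sum, deriving both complement IDs arithmetically as 3*S - id.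
import Mathlib
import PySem

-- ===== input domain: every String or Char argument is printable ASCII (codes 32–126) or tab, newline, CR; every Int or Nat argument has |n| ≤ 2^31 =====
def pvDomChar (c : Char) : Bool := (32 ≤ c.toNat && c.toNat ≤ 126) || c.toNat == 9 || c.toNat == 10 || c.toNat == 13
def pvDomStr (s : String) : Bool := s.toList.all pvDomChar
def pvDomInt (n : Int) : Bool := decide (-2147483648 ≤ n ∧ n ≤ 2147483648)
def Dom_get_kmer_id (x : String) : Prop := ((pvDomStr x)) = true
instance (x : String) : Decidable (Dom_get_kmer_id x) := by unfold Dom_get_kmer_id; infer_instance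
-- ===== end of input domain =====

-- B replaces A's four explicit strand strings and per-position power sums by a single pass
-- computing the forward and reverse base-5 encodings, deriving both complement IDs as 3*S - id.

-- ===== PORT A =====
def alphA : PySem.Dict Char Int :=
  PySem.Dict.ofList [('A', 0), ('C', 1), ('G', 2), ('T', 3), ('#', 4)]

def complementA : PySem.Dict Char Char :=
  PySem.Dict.ofList [('A', 'T'), ('C', 'G'), ('G', 'C'), ('T', 'A')]

-- sum([alph[kmr[i]] * l**i for i in range(len(kmr))]); lookup default is irrelevant under Pre_
def sumA (kmr : List Char) : Int :=
  (List.range kmr.length).foldl (fun acc i => acc + (alphA.getD (kmr.getD i ' ') 0) * 5 ^ i) 0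

def get_kmer_id (x : String) : Int :=
  let xs := x.toList
  let rev := xs.reverse                     -- x[::-1]  (PySem.List.slice?_none_none_neg_one)
  let comp := xs.map (fun c => complementA.getD c ' ')   -- KeyError excluded by Pre_
  let rev_comp := comp.reverse
  let kmrs := [xs, rev, comp, rev_comp].map (fun y => y ++ ['#'])
  (PySem.List.min? (kmrs.map sumA) (fun v => v)).getD 0

-- ===== PORT B =====
def digB : PySem.Dict Char Int :=
  PySem.Dict.ofList [('A', 0), ('C', 1), ('G', 2), ('T', 3)]

def get_kmer_id_alt (x : String) : Int :=
  let st := x.toList.foldl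
    (fun (st : Int × Int × Int × Int) c =>
      let f := st.1; let r := st.2.1; let s := st.2.2.1; let p := st.2.2.2
      let d := digB.getD c 0
      (f + d * p, r * 5 + d, s + p, p * 5))
    (0, 0, 0, 1)
  min (min st.1 st.2.1) (min (3 * st.2.2.1 - st.1) (3 * st.2.2.1 - st.2.1)) + 4 * st.2.2.2

-- ===== PRECONDITION & SPEC =====
-- Pre_ excludes exactly the strings with a character outside ACGT, on which A raises KeyError
-- (and B raises the same KeyError).
def Pre_get_kmer_id (x : String) : Prop :=
  (x.toList.all (fun c => c == 'A' || c == 'C' || c == 'G' || c == 'T')) = true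
instance (x : String) : Decidable (Pre_get_kmer_id x) := by unfold Pre_get_kmer_id; infer_instance

def pvWitness_get_kmer_id : String := "GATTACA"

def Spec_get_kmer_id (x : String) (out : Int) : Prop := out = get_kmer_id_alt x
instance (x : String) (out : Int) : Decidable (Spec_get_kmer_id x out) := by unfold Spec_get_kmer_id; infer_instance

-- ===== CLAIM (what is proved, stated in full; the proofs are below) =====
def Claim_equal_get_kmer_id : Prop := ∀ (x : String), Dom_get_kmer_id x → Pre_get_kmer_id x → Spec_get_kmer_id x (get_kmer_id x)

-- ===== LEMMAS AND PROOFS =====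

-- digit value of a character (B's mapping)
def dig (c : Char) : Int := digB.getD c 0

-- e l = sum dig(l_i) * 5^i ;  sS l = sum 5^i (i < |l|)
def eEnc : List Char → Int
  | [] => 0
  | c :: t => dig c + 5 * eEnc t

def sS : List Char → Int
  | [] => 0
  | _ :: t => 1 + 5 * sS t

def okACGT (l : List Char) : Prop := ∀ c ∈ l, c = 'A' ∨ c = 'C' ∨ c = 'G' ∨ c = 'T'

lemma sumA_eq_sum (l : List Char) :
    sumA l = ((List.range l.length).map
      (fun i => (alphA.getD (l.getD i ' ') 0) * 5 ^ i)).sum := by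
  unfold sumA
  rw [PySem.List.foldl_add]
  simp

lemma sumA_nil : sumA [] = 0 := by simp [sumA]

lemma sumA_cons (c : Char) (t : List Char) :
    sumA (c :: t) = alphA.getD c 0 + 5 * sumA t := by
  rw [sumA_eq_sum, sumA_eq_sum]
  rw [List.length_cons, List.range_succ_eq_map, List.map_cons, List.map_map]
  simp only [List.getD_cons_zero, pow_zero, mul_one, List.sum_cons]
  congr 1
  have : ((List.range t.length).map
      ((fun i => alphA.getD ((c :: t).getD i ' ') 0 * 5 ^ i) ∘ Nat.succ)) =
      (List.range t.length).map (fun i => (alphA.getD (t.getD i ' ') 0 * 5 ^ i) * 5) := by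
    apply List.map_congr_left
    intro i _
    simp [Function.comp, pow_succ]
    ring
  rw [this, List.sum_map_mul_right]
  ring

lemma sumA_hash_append (l : List Char) (h : okACGT l) :
    sumA (l ++ ['#']) = eEnc l + 4 * 5 ^ l.length := by
  induction l with
  | nil =>
      simp only [List.nil_append, sumA_cons, sumA_nil, eEnc, List.length_nil, pow_zero]
      decide
  | cons c t ih =>
      have hc := h c (by simp)
      have ht : okACGT t := fun d hd => h d (by simp [hd])
      have halph : (alphA.getD c 0 : Int) = dig c := by
        rcases hc with h | h | h | h <;> subst h <;> decide
      rw [List.cons_append, sumA_cons, ih ht, halph]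
      simp [eEnc, pow_succ]
      ring

lemma eEnc_append_singleton (l : List Char) (c : Char) :
    eEnc (l ++ [c]) = eEnc l + dig c * 5 ^ l.length := by
  induction l with
  | nil => simp [eEnc]
  | cons d t ih =>
      simp [eEnc, ih, pow_succ]
      ring

lemma sS_succ_pow (l : List Char) (c : Char) :
    sS (l ++ [c]) = sS l + 5 ^ l.length := by
  induction l with
  | nil => simp [sS]
  | cons d t ih =>
      simp [sS, ih, pow_succ]
      ring

lemma sS_pow (l : List Char) : 4 * sS l + 1 = 5 ^ l.length := by
  induction l with
  | nil => rfl
  | cons c t ih => simp [sS, pow_succ]; linarith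

lemma sS_eq_length (l : List Char) : sS l.reverse = sS l := by
  induction l with
  | nil => rfl
  | cons c t ih =>
      rw [List.reverse_cons, sS_succ_pow, ih, List.length_reverse]
      have := sS_pow t
      simp only [sS]
      linarith

lemma okACGT_reverse (l : List Char) (h : okACGT l) : okACGT l.reverse := by
  intro c hc
  exact h c (List.mem_reverse.mp hc)

lemma comp_char (c : Char) (h : c = 'A' ∨ c = 'C' ∨ c = 'G' ∨ c = 'T') :
    dig (complementA.getD c ' ') = 3 - dig c := by
  rcases h with h | h | h | h <;> subst h <;> decide

lemma eEnc_comp (l : List Char) (h : okACGT l) :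
    eEnc (l.map (fun c => complementA.getD c ' ')) = 3 * sS l - eEnc l := by
  induction l with
  | nil => simp [eEnc, sS]
  | cons c t ih =>
      have hc := h c (by simp)
      have ht : okACGT t := fun d hd => h d (by simp [hd])
      simp only [List.map_cons, eEnc, sS, ih ht, comp_char c hc]
      ring

lemma map_comp_reverse (l : List Char) :
    (l.map (fun c => complementA.getD c ' ')).reverse =
    l.reverse.map (fun c => complementA.getD c ' ') := by
  rw [List.map_reverse]

lemma foldB_inv (l : List Char) (f0 r0 s0 p0 : Int) :
    l.foldl (fun (st : Int × Int × Int × Int) c =>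
      let f := st.1; let r := st.2.1; let s := st.2.2.1; let p := st.2.2.2
      let d := digB.getD c 0
      (f + d * p, r * 5 + d, s + p, p * 5)) (f0, r0, s0, p0)
    = (f0 + p0 * eEnc l, r0 * 5 ^ l.length + eEnc l.reverse,
       s0 + p0 * sS l, p0 * 5 ^ l.length) := by
  induction l generalizing f0 r0 s0 p0 with
  | nil => simp [eEnc, sS]
  | cons c t ih =>
      rw [List.foldl_cons]
      simp only []
      rw [ih]
      have hrev : eEnc ((c :: t).reverse) = eEnc t.reverse + dig c * 5 ^ t.length := by
        rw [List.reverse_cons, eEnc_append_singleton]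
        simp
      rw [hrev]
      simp only [eEnc, sS, List.length_cons, dig, pow_succ]
      refine Prod.ext ?_ (Prod.ext ?_ (Prod.ext ?_ ?_)) <;> simp <;> ring

theorem get_kmer_id_spec : Claim_equal_get_kmer_id := by
  intro x _ hpre
  unfold Spec_get_kmer_id get_kmer_id get_kmer_id_alt
  simp only []
  set l := x.toList with hl
  have hok : okACGT l := by
    unfold Pre_get_kmer_id at hpre
    simp only [List.all_eq_true, Bool.or_eq_true, beq_iff_eq] at hpre
    intro c hc
    rcases hpre c hc with ((h | h) | h) | h <;> simp [h]
  rw [foldB_inv]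
  simp only [List.map_cons, List.map_nil]
  rw [PySem.List.min?_id_cons]
  simp only [List.foldl_cons, List.foldl_nil, Option.getD_some]
  have h1 : sumA (l ++ ['#']) = eEnc l + 4 * 5 ^ l.length := sumA_hash_append l hok
  have h2 : sumA (l.reverse ++ ['#']) = eEnc l.reverse + 4 * 5 ^ l.length := by
    rw [sumA_hash_append l.reverse (okACGT_reverse l hok), List.length_reverse]
  have h3 : sumA (l.map (fun c => complementA.getD c ' ') ++ ['#'])
      = (3 * sS l - eEnc l) + 4 * 5 ^ l.length := by
    have hok' : okACGT (l.map (fun c => complementA.getD c ' ')) := by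
      intro d hd
      rcases List.mem_map.mp hd with ⟨c, hc, rfl⟩
      rcases hok c hc with h | h | h | h <;> subst h <;> decide
    rw [sumA_hash_append _ hok', eEnc_comp l hok, List.length_map]
  have h4 : sumA ((l.map (fun c => complementA.getD c ' ')).reverse ++ ['#'])
      = (3 * sS l - eEnc l.reverse) + 4 * 5 ^ l.length := by
    have hokr : okACGT l.reverse := okACGT_reverse l hok
    have hok' : okACGT (l.reverse.map (fun c => complementA.getD c ' ')) := by
      intro d hd
      rcases List.mem_map.mp hd with ⟨c, hc, rfl⟩
      rcases hokr c hc with h | h | h | h <;> subst h <;> decide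
    rw [map_comp_reverse, sumA_hash_append _ hok', eEnc_comp l.reverse hokr,
      List.length_map, List.length_reverse, sS_eq_length]
  rw [h1, h2, h3, h4]
  simp only [one_mul, zero_add, zero_mul]
  have key : ∀ a b s p : Int,
      min (min (min (a + 4 * p) (b + 4 * p)) (3 * s - a + 4 * p)) (3 * s - b + 4 * p)
      = min (min a b) (min (3 * s - a) (3 * s - b)) + 4 * p := by
    intro a b s p
    simp only [min_def]
    split_ifs <;> omega
  exact key (eEnc l) (eEnc l.reverse) (sS l) (5 ^ l.length)
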